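-- pv_equiv track=rewrite | github.com/aravindas4/snippetbox-1 | leets/unique_elems.py | solve
-- ===== SOURCE A (Python) =====
-- def solve(A):
--     A.sort()
--     N = len(A)
--     count = 0
--
--     for idx in range(1, N):
--         if A[idx] == A[idx-1]:
--             count += 1
--             A[idx] += 1
--         elif A[idx] < A[idx-1]:
--             r = A[idx-1] + 1 - A[idx]
--             count += r
--             A[idx] += r
--     return count
-- ===== SOURCE B (Python) =====
-- def solve(A):
--     cnt = {}
--     for x in A:
--         cnt[x] = cnt.get(x, 0) + 1
--     total = 0
--     result = []
--     prev = None
--     for k in sorted(cnt):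
--         c = cnt[k]
--         start = k if (prev is None or k > prev) else prev + 1
--         total += c * (start - k) + c * (c - 1) // 2
--         result.extend(range(start, start + c))
--         prev = start + c - 1
--     A[:] = result
--     return total
-- ===== Notes on version B (the rewrite author's own statement) =====
-- stated objective: alternative
-- what changed: Replaces A's sort-then-per-element fixup scan (which walks every element, comparing and bumping it against its predecessor) by a frequency-dictionary sweep over the sorted distinct values, charging each value's whole group in closed form (c*(start-k) + c*(c-1)/2) and materializing the final unique sequence back into A.
import Mathlib
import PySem

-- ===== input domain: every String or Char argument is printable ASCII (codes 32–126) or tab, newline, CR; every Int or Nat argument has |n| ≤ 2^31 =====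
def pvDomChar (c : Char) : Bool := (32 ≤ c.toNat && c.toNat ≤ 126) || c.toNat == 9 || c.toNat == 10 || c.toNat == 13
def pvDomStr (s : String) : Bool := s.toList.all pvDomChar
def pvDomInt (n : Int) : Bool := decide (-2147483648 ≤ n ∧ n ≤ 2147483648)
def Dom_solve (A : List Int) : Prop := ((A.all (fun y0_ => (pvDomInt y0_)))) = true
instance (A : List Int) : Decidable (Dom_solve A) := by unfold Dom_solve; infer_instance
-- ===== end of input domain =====

-- B replaces A's sort-then-per-element fixup scan by a frequency-dictionary sweep over the distinct
-- values with a per-group closed form (objective: alternative). Both Pythons mutate the argument list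
-- in place to the same final sequence; the equivalence proved here is about the RETURN value.

-- ===== PORT A =====
-- A's for-loop reads A[idx-1] (already finalized) and writes A[idx]; the port carries that
-- finalized previous element as `prev` through the obvious structural recursion on the sorted list.
def solveLoop (prev : Int) (l : List Int) (count : Int) : Int :=
  match l with
  | [] => count
  | a :: rest =>
    if a = prev then solveLoop (a + 1) rest (count + 1)
    else if a < prev then
      let r := prev + 1 - a
      solveLoop (a + r) rest (count + r)
    else solveLoop a rest count

def solve (A : List Int) : Int :=
  match PySem.List.sorted A (fun x => x) false with
  | [] => 0
  | h :: t => solveLoop h t 0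

-- ===== PORT B =====
-- Follows Source B: build the frequency dict, sweep the sorted distinct keys carrying (total, prev).
-- Source B's `result` list only feeds the in-place assignment A[:] = result (a side effect outside the
-- return value), so it is not part of this port.
def solve_alt (A : List Int) : Int :=
  let cnt := A.foldl (fun d x => d.insert x (d.getD x 0 + 1)) PySem.Dict.empty
  let st := (PySem.List.sorted cnt.keys (fun x => x) false).foldl
    (fun (s : Int × Option Int) k =>
      let c := cnt.getD k 0
      let start := match s.2 with
        | none => k
        | some p => if p < k then k else p + 1
      (s.1 + c * (start - k) + PySem.Int.floordiv (c * (c - 1)) 2, some (start + c - 1)))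
    (0, none)
  st.1

-- ===== PRECONDITION & SPEC =====
def Spec_solve (A : List Int) (out : Int) : Prop := out = solve_alt A
instance (A : List Int) (out : Int) : Decidable (Spec_solve A out) := by unfold Spec_solve; infer_instance

-- ===== CLAIM (what is proved, stated in full; the proofs are below) =====
def Claim_equal_solve : Prop := ∀ (A : List Int), Dom_solve A → Spec_solve A (solve A)

-- ===== LEMMAS AND PROOFS =====

-- triangular number 0+1+...+(n-1), as an Int
def triI (n : Nat) : Int := ((n * (n - 1) / 2 : Nat) : Int)

lemma triI_succ (n : Nat) : triI (n + 1) = triI n + n := by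
  have h1 : 2 ∣ n * (n - 1) := by
    cases n with
    | zero => simp
    | succ m => simpa [Nat.mul_comm] using (Nat.even_mul_succ_self m).two_dvd
  have h2 : (n + 1) * n = n * (n - 1) + 2 * n := by
    cases n with
    | zero => simp
    | succ m => simp; ring
  have h3 : (n + 1) * ((n + 1) - 1) / 2 = n * (n - 1) / 2 + n := by
    simp only [Nat.add_sub_cancel]
    obtain ⟨a, ha⟩ : ∃ a, n * (n - 1) = a := ⟨_, rfl⟩
    rw [ha] at h1 h2
    rw [h2]
    omega
  unfold triI
  rw [h3]
  push_cast
  ring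

lemma floordiv_tri (n : Nat) : PySem.Int.floordiv ((n : Int) * ((n : Int) - 1)) 2 = triI n := by
  cases n with
  | zero => decide
  | succ m =>
    have h : ((m + 1 : Nat) : Int) * (((m + 1 : Nat) : Int) - 1) = (((m + 1) * m : Nat) : Int) := by
      push_cast; ring
    rw [h, show (2 : Int) = ((2 : Nat) : Int) from rfl, PySem.Int.floordiv_natCast]
    unfold triI
    norm_num

-- one element of A's scan, with the new previous value written as a single expression
lemma solveLoop_cons_start (p k : Int) (l : List Int) (count : Int) :
    solveLoop p (k :: l) count
      = solveLoop (if p < k then k else p + 1) l (count + ((if p < k then k else p + 1) - k)) := by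
  simp only [solveLoop]
  split_ifs with h1 h2 h3 h3 <;> (congr 1 <;> omega)

-- a run of c equal elements k, entered with k ≤ p, costs c*(p+1-k) + (0+1+...+(c-1))
lemma solveLoop_replicate (c : Nat) : ∀ (p k : Int) (rest : List Int) (count : Int), k ≤ p →
    solveLoop p (List.replicate c k ++ rest) count
      = solveLoop (p + c) rest (count + c * (p + 1 - k) + triI c) := by
  induction c with
  | zero => intro p k rest count _; simp [triI]
  | succ m ih =>
    intro p k rest count hk
    rw [List.replicate_succ, List.cons_append, solveLoop_cons_start]
    have hpk : ¬ p < k := by omega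
    rw [if_neg hpk]
    rw [ih (p + 1) k rest _ (by omega)]
    have harg : p + 1 + (m : Int) = p + ((m : Nat) + 1 : Nat) := by push_cast; ring
    have hcnt : count + (p + 1 - k) + m * (p + 1 + 1 - k) + triI m
        = count + ((m : Nat) + 1 : Nat) * (p + 1 - k) + triI (m + 1) := by
      rw [triI_succ]; push_cast; ring
    rw [harg, hcnt]

-- A's scan, with the "first element has no predecessor" entry point made explicit
def goA : Option Int → List Int → Int → Int
  | none, [], count => count
  | none, h :: t, count => solveLoop h t count
  | some p, l, count => solveLoop p l count

-- B's per-key step, abstracted over the multiplicity function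
def Bstep (cntf : Int → Nat) (s : Int × Option Int) (k : Int) : Int × Option Int :=
  let c : Int := (cntf k : Int)
  let start := match s.2 with
    | none => k
    | some p => if p < k then k else p + 1
  (s.1 + c * (start - k) + PySem.Int.floordiv (c * (c - 1)) 2, some (start + c - 1))

-- the heart: A's scan over the grouped sorted list = B's per-distinct-value sweep
lemma main_lemma (cntf : Int → Nat) : ∀ (ks : List Int) (op : Option Int) (count : Int),
    (∀ k ∈ ks, 1 ≤ cntf k) →
    goA op (ks.flatMap (fun k => List.replicate (cntf k) k)) count
      = (ks.foldl (Bstep cntf) (count, op)).1 := by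
  intro ks
  induction ks with
  | nil => intro op count _; cases op <;> simp [goA, solveLoop]
  | cons k ks ih =>
    intro op count hmem
    obtain ⟨m, hm⟩ : ∃ m, cntf k = m + 1 := by
      have := hmem k (by simp); exact ⟨cntf k - 1, by omega⟩
    have hks : ∀ k' ∈ ks, 1 ≤ cntf k' := fun k' h => hmem k' (by simp [h])
    have hfd : PySem.Int.floordiv (((m + 1 : Nat) : Int) * (((m + 1 : Nat) : Int) - 1)) 2
        = triI m + m := by rw [floordiv_tri, triI_succ]
    rw [List.flatMap_cons, List.foldl_cons, hm]
    cases op with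
    | none =>
      have hstep : Bstep cntf (count, none) k
          = (count + (m : Int) * (k + 1 - k) + triI m, some (k + (m : Int))) := by
        simp only [Bstep, hm, Prod.mk.injEq, Option.some.injEq]
        rw [hfd]
        constructor <;> (push_cast; ring)
      rw [hstep, List.replicate_succ, List.cons_append]
      show solveLoop k (List.replicate m k ++ _) count = _
      rw [solveLoop_replicate m k k _ count le_rfl]
      exact ih (some (k + (m : Int))) _ hks
    | some p =>
      have hkst : k ≤ (if p < k then k else p + 1) := by split <;> omega
      have hstep : Bstep cntf (count, some p) k
          = (count + ((if p < k then k else p + 1) - k)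
              + (m : Int) * ((if p < k then k else p + 1) + 1 - k) + triI m,
             some ((if p < k then k else p + 1) + (m : Int))) := by
        simp only [Bstep, hm, Prod.mk.injEq, Option.some.injEq]
        rw [hfd]
        constructor <;> (push_cast; ring)
      rw [hstep, List.replicate_succ, List.cons_append]
      show solveLoop p (k :: (List.replicate m k ++ _)) count = _
      rw [solveLoop_cons_start, solveLoop_replicate m _ k _ _ hkst]
      exact ih (some _) _ hks

-- count of v in a flatMap of replicates over a Nodup key list
lemma count_flatMap_replicate (f : Int → Nat) (v : Int) :
    ∀ (ks : List Int), ks.Nodup →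
      (ks.flatMap (fun k => List.replicate (f k) k)).count v = if v ∈ ks then f v else 0 := by
  intro ks
  induction ks with
  | nil => simp
  | cons k ks ih =>
    intro hnd
    rw [List.flatMap_cons, List.count_append, ih hnd.of_cons]
    have hk : k ∉ ks := (List.nodup_cons.mp hnd).1
    by_cases hv : v = k
    · subst hv
      simp [hk]
    · simp [List.count_replicate, hv, Ne.symm hv, List.mem_cons]

lemma sorted_pairwise_le (xs : List Int) :
    (PySem.List.sorted xs (fun x => x) false).Pairwise (· ≤ ·) := by
  rw [List.pairwise_iff_getElem]
  intro i j hi hj hij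
  exact PySem.List.sorted_id_getElem_mono xs (le_of_lt hij) hj

-- the sorted list is the concatenation of its groups, taken over the sorted distinct values
lemma sorted_eq_flatMap (A : List Int) :
    PySem.List.sorted A (fun x => x) false
      = (PySem.List.sorted (PySem.Set.ofList A) (fun x => x) false).flatMap
          (fun k => List.replicate (A.count k) k) := by
  set ks := PySem.List.sorted (PySem.Set.ofList A) (fun x => x) false with hks
  have hksperm : ks.Perm (PySem.Set.ofList A) := PySem.List.sorted_perm _ _ _
  have hksnd : ks.Nodup := hksperm.nodup_iff.mpr (PySem.Set.nodup_ofList A)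
  have hmemks : ∀ v, v ∈ ks ↔ v ∈ A := by
    intro v; rw [hksperm.mem_iff, PySem.Set.mem_ofList]
  have hperm : (PySem.List.sorted A (fun x => x) false).Perm
      (ks.flatMap (fun k => List.replicate (A.count k) k)) := by
    refine (PySem.List.sorted_perm A _ false).trans (List.perm_iff_count.mpr fun v => ?_)
    rw [count_flatMap_replicate _ _ ks hksnd]
    by_cases hv : v ∈ ks
    · simp [hv]
    · rw [if_neg hv]
      exact List.count_eq_zero.mpr (fun h => hv ((hmemks v).mpr h))
  have hpw1 : (PySem.List.sorted A (fun x => x) false).Pairwise (· ≤ ·) := sorted_pairwise_le A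
  have hpw2 : (ks.flatMap (fun k => List.replicate (A.count k) k)).Pairwise (· ≤ ·) := by
    rw [List.flatMap_def, List.pairwise_flatten]
    refine ⟨?_, ?_⟩
    · intro l hl
      obtain ⟨k, _, rfl⟩ := List.mem_map.mp hl
      exact List.pairwise_replicate.mpr (Or.inr le_rfl)
    · rw [List.pairwise_map]
      refine (sorted_pairwise_le _).imp_of_mem ?_
      intro a b _ _ hab x hx y hy
      rw [List.eq_of_mem_replicate hx, List.eq_of_mem_replicate hy]
      exact hab
  exact PySem.List.eq_of_perm_of_pairwise_le_of_injective (fun x => x)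
    (fun _ _ h => h) hperm hpw1 hpw2

lemma solve_eq_goA (A : List Int) :
    solve A = goA none (PySem.List.sorted A (fun x => x) false) 0 := by
  unfold solve
  cases PySem.List.sorted A (fun x => x) false <;> rfl

-- ===== VERDICT (by name: the statement is the Claim_ definition above) =====
theorem solve_spec : Claim_equal_solve := by
  intro A _
  show solve A = solve_alt A
  rw [solve_eq_goA, sorted_eq_flatMap]
  simp only [solve_alt, PySem.Dict.foldl_insert_getD_add_one_eq_counter,
    PySem.Dict.keys_counter]
  have hcongr : ∀ (init : Int × Option Int),
      (PySem.List.sorted (PySem.Set.ofList A) (fun x => x) false).foldl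
        (fun (s : Int × Option Int) k =>
          let c := (PySem.Dict.counter A).getD k 0
          let start := match s.2 with
            | none => k
            | some p => if p < k then k else p + 1
          (s.1 + c * (start - k) + PySem.Int.floordiv (c * (c - 1)) 2, some (start + c - 1)))
        init
      = (PySem.List.sorted (PySem.Set.ofList A) (fun x => x) false).foldl
          (Bstep (fun k => A.count k)) init := by
    intro init
    refine PySem.List.foldl_congr_mem _ _ _ _ ?_
    intro acc k _
    simp only [Bstep, PySem.Dict.getD_counter]
  rw [hcongr]
  refine (main_lemma (fun k => A.count k) _ none 0 ?_).trans rfl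
  intro k hk
  have hkA : k ∈ A := by
    rw [(PySem.List.sorted_perm _ _ _).mem_iff, PySem.Set.mem_ofList] at hk
    exact hk
  exact List.count_pos_iff.mpr hkA
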